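-- pv_equiv track=rewrite | github.com/genetrydash/geometry_dash_advance | export_levels.py | rle_compress_level
-- ===== SOURCE A (Python) =====
-- def rle_compress_level(level_array):
--     """Compresses the level array using Run-Length Encoding (RLE) across the entire level, joining columns sequentially."""
--     compressed = []
--     flat_level = []
--
--     # Flatten the level array column by column
--     for col in range(len(level_array[0])):
--         for row in range(len(level_array)):
--             value = level_array[row][col] - 1
--
--             # Convert negative values into air
--             if value < 0: value = 0
--
--             # Mask highest 4 bits as those aren't part of the ID
--             value = value & 0x0fffffff
--             flat_level.append(value)
--
--     # Perform RLE compression on the flattened array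
--     count = 1
--
--     prev_value = flat_level[0]
--     for i in range(1, len(flat_level)):
--         current_value = flat_level[i]
--
--         if current_value == prev_value:
--             count += 1
--         else:
--             compressed.append((prev_value, count - 1))
--             prev_value = current_value
--             count = 1
--
--
--     compressed.append((prev_value, count - 1))  # Add the last run
--
--     return compressed
-- ===== SOURCE B (Python) =====
-- def rle_compress_level(level_array):
--     """Single fused column-major pass: RLE-compress on the fly, without building an intermediate flat list."""
--     def transform(x):
--         v = x - 1
--         if v < 0:
--             v = 0
--         return v & 0x0FFFFFFF
--
--     prev = transform(level_array[0][0])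
--     count = 0
--     compressed = []
--     for col in range(len(level_array[0])):
--         for row in range(len(level_array)):
--             v = transform(level_array[row][col])
--             if v == prev:
--                 count += 1
--             else:
--                 compressed.append((prev, count - 1))
--                 prev = v
--                 count = 1
--     compressed.append((prev, count - 1))
--     return compressed
-- ===== Notes on version B (the rewrite author's own statement) =====
-- stated objective: simpler
-- what changed: Fuses A's two phases (materialize a column-major flat list, then index-driven RLE) into one streaming column-major pass that updates the current run (prev, count) cell by cell with no intermediate flat list.
import Mathlib
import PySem

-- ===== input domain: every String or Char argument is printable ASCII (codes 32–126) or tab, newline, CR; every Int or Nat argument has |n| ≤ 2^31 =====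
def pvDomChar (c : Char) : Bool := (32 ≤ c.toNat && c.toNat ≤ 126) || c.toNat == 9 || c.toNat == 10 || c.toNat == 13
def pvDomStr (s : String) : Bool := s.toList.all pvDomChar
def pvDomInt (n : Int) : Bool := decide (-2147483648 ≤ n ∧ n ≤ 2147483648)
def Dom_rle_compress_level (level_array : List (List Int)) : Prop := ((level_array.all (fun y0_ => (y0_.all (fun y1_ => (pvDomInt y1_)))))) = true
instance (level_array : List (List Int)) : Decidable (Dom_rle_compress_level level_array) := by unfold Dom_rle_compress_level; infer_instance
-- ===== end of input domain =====

-- B fuses A's two phases (flatten, then RLE) into one streaming column-major pass with no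
-- intermediate flat list (objective: simpler decomposition; same asymptotic cost).
-- A raises IndexError on grids excluded by Pre_; no return value is changed.

-- ===== PORT A =====
-- Literal port of A: build flat_level column by column, then RLE-compress it by index.
-- Indexing uses pyGetD: Pre_ guarantees every index is in range, exactly where Python returns.
def rle_compress_level (level_array : List (List Int)) : List (Int × Int) :=
  let flat_level : List Int :=
    (PySem.List.pyRange 0 ((PySem.List.pyGetD level_array 0 []).length : Int) 1).foldl
      (fun flat col =>
        (PySem.List.pyRange 0 (level_array.length : Int) 1).foldl
          (fun flat row =>
            let value := PySem.List.pyGetD (PySem.List.pyGetD level_array row []) col 0 - 1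
            let value := if value < 0 then 0 else value
            let value := PySem.Int.band value 0x0fffffff
            flat ++ [value]) flat) []
  let prev0 := PySem.List.pyGetD flat_level 0 0
  let st := (PySem.List.pyRange 1 (flat_level.length : Int) 1).foldl
      (fun (st : List (Int × Int) × Int × Int) i =>
        let current := PySem.List.pyGetD flat_level i 0
        if current = st.2.1 then (st.1, st.2.1, st.2.2 + 1)
        else (st.1 ++ [(st.2.1, st.2.2 - 1)], current, 1))
      ([], prev0, 1)
  st.1 ++ [(st.2.1, st.2.2 - 1)]

-- ===== PORT B =====
def pvTransform (x : Int) : Int :=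
  let v := x - 1
  PySem.Int.band (if v < 0 then 0 else v) 0x0fffffff

-- Literal port of B: seed the run from the transformed top-left cell, then stream all cells
-- in column-major order, extending or emitting runs on the fly.
def rle_compress_level_alt (level_array : List (List Int)) : List (Int × Int) :=
  let st := (PySem.List.pyRange 0 ((PySem.List.pyGetD level_array 0 []).length : Int) 1).foldl
    (fun st col =>
      (PySem.List.pyRange 0 (level_array.length : Int) 1).foldl
        (fun (st : List (Int × Int) × Int × Int) row =>
          let v := pvTransform (PySem.List.pyGetD (PySem.List.pyGetD level_array row []) col 0)
          if v = st.2.1 then (st.1, st.2.1, st.2.2 + 1)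
          else (st.1 ++ [(st.2.1, st.2.2 - 1)], v, 1)) st)
    ([], pvTransform (PySem.List.pyGetD (PySem.List.pyGetD level_array 0 []) 0 0), 0)
  st.1 ++ [(st.2.1, st.2.2 - 1)]

-- ===== PRECONDITION & SPEC =====
-- Pre_ excludes exactly the inputs where Python A raises IndexError: the empty grid, a grid
-- whose first row is empty (flat_level[0] fails), and ragged grids where some row is shorter
-- than the first row (level_array[row][col] fails). B raises there too.
def Pre_rle_compress_level (level_array : List (List Int)) : Prop :=
  level_array ≠ [] ∧ 0 < (level_array.headD []).length ∧
    ∀ row ∈ level_array, (level_array.headD []).length ≤ row.length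
instance (level_array : List (List Int)) : Decidable (Pre_rle_compress_level level_array) := by
  unfold Pre_rle_compress_level; infer_instance

def pvWitness_rle_compress_level : List (List Int) := [[1, 2, 2], [3, 2, 2]]

def Spec_rle_compress_level (level_array : List (List Int)) (out : List (Int × Int)) : Prop := out = rle_compress_level_alt level_array
instance (level_array : List (List Int)) (out : List (Int × Int)) : Decidable (Spec_rle_compress_level level_array out) := by unfold Spec_rle_compress_level; infer_instance

-- ===== CLAIM (what is proved, stated in full; the proofs are below) =====
def Claim_equal_rle_compress_level : Prop := ∀ (level_array : List (List Int)), Dom_rle_compress_level level_array → Pre_rle_compress_level level_array → Spec_rle_compress_level level_array (rle_compress_level level_array)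

-- ===== LEMMAS AND PROOFS =====

-- The RLE step both programs perform on one transformed cell value.
def pvStep (st : List (Int × Int) × Int × Int) (v : Int) : List (Int × Int) × Int × Int :=
  if v = st.2.1 then (st.1, st.2.1, st.2.2 + 1)
  else (st.1 ++ [(st.2.1, st.2.2 - 1)], v, 1)

-- The column-major sequence of transformed cells.
def pvCells (la : List (List Int)) : List Int :=
  (PySem.List.pyRange 0 ((PySem.List.pyGetD la 0 []).length : Int) 1).flatMap
    (fun col => (PySem.List.pyRange 0 (la.length : Int) 1).map
      (fun row => pvTransform (PySem.List.pyGetD (PySem.List.pyGetD la row []) col 0)))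

-- A's flatten phase produces exactly pvCells.
theorem pvFlatA (la : List (List Int)) :
    ((PySem.List.pyRange 0 ((PySem.List.pyGetD la 0 []).length : Int) 1).foldl
      (fun flat col =>
        (PySem.List.pyRange 0 (la.length : Int) 1).foldl
          (fun flat row =>
            let value := PySem.List.pyGetD (PySem.List.pyGetD la row []) col 0 - 1
            let value := if value < 0 then 0 else value
            let value := PySem.Int.band value 0x0fffffff
            flat ++ [value]) flat) []) = pvCells la := by
  simp only [pvCells, pvTransform, PySem.List.foldl_append_singleton_eq_map,
    PySem.List.foldl_append_eq_flatMap, List.nil_append]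

-- B's nested fold is a fold of pvStep over pvCells.
theorem pvFoldB (la : List (List Int)) (init : List (Int × Int) × Int × Int) :
    ((PySem.List.pyRange 0 ((PySem.List.pyGetD la 0 []).length : Int) 1).foldl
      (fun st col =>
        (PySem.List.pyRange 0 (la.length : Int) 1).foldl
          (fun (st : List (Int × Int) × Int × Int) row =>
            let v := pvTransform (PySem.List.pyGetD (PySem.List.pyGetD la row []) col 0)
            if v = st.2.1 then (st.1, st.2.1, st.2.2 + 1)
            else (st.1 ++ [(st.2.1, st.2.2 - 1)], v, 1)) st) init)
      = (pvCells la).foldl pvStep init := by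
  simp only [pvCells, List.foldl_flatMap, List.foldl_map, pvStep]

-- Under Pre_, pvCells starts with the transformed top-left cell.
theorem pvCells_cons (la : List (List Int)) (h : Pre_rle_compress_level la) :
    pvCells la = pvTransform (PySem.List.pyGetD (PySem.List.pyGetD la 0 []) 0 0) :: (pvCells la).drop 1 := by
  cases la with
  | nil => exact absurd rfl h.1
  | cons a t =>
    obtain ⟨-, h2, -⟩ := h
    have hm : (0:Int) < ((PySem.List.pyGetD (a :: t) 0 ([]:List Int)).length : Int) := by
      simp [PySem.List.pyGetD_zero_cons]
      simpa using h2
    have hn : (0:Int) < (((a :: t) : List (List Int)).length : Int) := by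
      simp
    unfold pvCells
    rw [PySem.List.pyRange_one_cons hm, PySem.List.pyRange_one_cons hn]
    simp

-- ===== VERDICT (by name: the statement is the Claim_ definition above) =====
theorem rle_compress_level_spec : Claim_equal_rle_compress_level := by
  intro la _ h
  unfold Spec_rle_compress_level
  simp only [rle_compress_level, rle_compress_level_alt]
  rw [pvFlatA, pvFoldB]
  have hstep : (fun (st : List (Int × Int) × Int × Int) (i : Int) =>
      pvStep st (PySem.List.pyGetD (pvCells la) i 0)) =
      (fun (st : List (Int × Int) × Int × Int) (i : Int) =>
        if PySem.List.pyGetD (pvCells la) i 0 = st.2.1 then (st.1, st.2.1, st.2.2 + 1)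
        else (st.1 ++ [(st.2.1, st.2.2 - 1)], PySem.List.pyGetD (pvCells la) i 0, 1)) := rfl
  rw [← hstep, PySem.List.foldl_pyRange_pyGetD' (pvCells la) 0 pvStep _ (by norm_num : (0:Int) ≤ 1)]
  have hc := pvCells_cons la h
  generalize ht : (pvCells la).drop 1 = tl at hc
  rw [hc]
  simp [pvStep, PySem.List.pyGetD_zero_cons]
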